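-- pv_equiv track=rewrite | github.com/fenfen22/AlgorithmsForMassiveDataSets | IntegerDataStructure1/UniversaHashing.py | base_m_representation
-- ===== SOURCE A (Python) =====
-- def base_m_representation(x, m):
--         if m < 2 or not isinstance(m, int):
--             raise ValueError("m must be a prime number greater than or equal to 2.")
--         if x == 0:
--             return [0]
--         result = []
--         while x > 0:
--             remainder = x % m
--             result.append(remainder)
--             x = x // m # floor division operator
--         return result[::-1] # return the result list in reverse order
-- ===== SOURCE B (Python) =====
-- def base_m_representation(x, m):
--     if m < 2 or not isinstance(m, int):
--         raise ValueError("m must be a prime number greater than or equal to 2.")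
--     if x == 0:
--         return [0]
--     powers = []
--     p = 1
--     while p <= x:
--         powers.append(p)
--         p *= m
--     return [x // q % m for q in reversed(powers)]
-- ===== Notes on version B (the rewrite author's own statement) =====
-- stated objective: alternative
-- what changed: Replaces the divide-append-reverse while loop with a two-stage algorithm: first build the list of powers of m not exceeding x, then read each digit independently as x // p % m over the reversed power list, so x is never mutated and no reversal of digits is needed.
import Mathlib
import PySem

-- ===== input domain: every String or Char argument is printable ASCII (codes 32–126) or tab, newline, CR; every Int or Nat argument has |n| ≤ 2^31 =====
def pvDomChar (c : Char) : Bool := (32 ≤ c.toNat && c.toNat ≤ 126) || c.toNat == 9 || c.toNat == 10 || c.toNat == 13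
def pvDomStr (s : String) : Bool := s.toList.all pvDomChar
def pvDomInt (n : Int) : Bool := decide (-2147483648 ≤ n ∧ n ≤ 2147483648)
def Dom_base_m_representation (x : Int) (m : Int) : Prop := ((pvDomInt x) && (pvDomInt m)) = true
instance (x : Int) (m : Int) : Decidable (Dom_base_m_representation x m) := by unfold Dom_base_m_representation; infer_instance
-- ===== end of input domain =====

-- B replaces A's divide-append-reverse loop by a two-stage algorithm: collect the powers of m
-- up to x, then read each digit independently as x // p % m over the reversed power list.

-- ===== PORT A =====
-- A's while loop: append x % m, set x = x // m, while x > 0.  The '2 ≤ m' conjunct in the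
-- dite guard only makes the recursion total in Lean (Pre_ excludes m < 2, where Python raises).
def pvALoop (m : Int) (x : Int) (result : List Int) : List Int :=
  if h : 0 < x ∧ 2 ≤ m then
    pvALoop m (PySem.Int.floordiv x m) (result ++ [PySem.Int.mod x m])
  else result
termination_by x.toNat
decreasing_by
  have h2 : PySem.Int.floordiv x m = x / m := PySem.Int.floordiv_eq_ediv_of_pos (by omega)
  have h3 : x / m < x := Int.ediv_lt_of_lt_mul (by omega) (by nlinarith [h.1, h.2])
  have h4 : 0 ≤ x / m := Int.ediv_nonneg (le_of_lt h.1) (by omega)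
  omega

def base_m_representation (x : Int) (m : Int) : List Int :=
  if x == 0 then [0]
  else (pvALoop m x []).reverse   -- result[::-1] on the whole list = List.reverse (exact)

-- ===== PORT B =====
-- B's first loop: powers.append(p); p *= m, while p <= x.  The '2 ≤ m ∧ 1 ≤ p' conjuncts in
-- the dite guard only make the recursion total in Lean (Python raises for m < 2; p starts at 1).
def pvPowers (x : Int) (m : Int) (p : Int) : List Int :=
  if h : p ≤ x ∧ 2 ≤ m ∧ 1 ≤ p then p :: pvPowers x m (p * m) else []
termination_by (x + 1 - p).toNat
decreasing_by
  have h2 : p + 1 ≤ p * m := by nlinarith [h.2.1, h.2.2]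
  omega

-- [x // q % m for q in reversed(powers)]
def base_m_representation_alt (x : Int) (m : Int) : List Int :=
  if x == 0 then [0]
  else (pvPowers x m 1).reverse.map (fun q => PySem.Int.mod (PySem.Int.floordiv x q) m)

-- ===== PRECONDITION & SPEC =====
-- Pre_ excludes exactly m < 2, where Python A raises ValueError (isinstance(m, int) is always true here).
def Pre_base_m_representation (x : Int) (m : Int) : Prop := 2 ≤ m
instance (x : Int) (m : Int) : Decidable (Pre_base_m_representation x m) := by unfold Pre_base_m_representation; infer_instance
def pvWitness_base_m_representation : Int × Int := (13, 3)

def Spec_base_m_representation (x : Int) (m : Int) (out : List Int) : Prop := out = base_m_representation_alt x m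
instance (x : Int) (m : Int) (out : List Int) : Decidable (Spec_base_m_representation x m out) := by unfold Spec_base_m_representation; infer_instance

-- ===== CLAIM (what is proved, stated in full; the proofs are below) =====
def Claim_equal_base_m_representation : Prop := ∀ (x : Int) (m : Int), Dom_base_m_representation x m → Pre_base_m_representation x m → Spec_base_m_representation x m (base_m_representation x m)

-- ===== LEMMAS AND PROOFS =====
theorem pvALoop_acc (m x : Int) (acc : List Int) :
    pvALoop m x acc = acc ++ pvALoop m x [] := by
  by_cases h : 0 < x ∧ 2 ≤ m
  · conv_lhs => rw [pvALoop, dif_pos h]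
    conv_rhs => rw [pvALoop, dif_pos h]
    rw [pvALoop_acc m (PySem.Int.floordiv x m) (acc ++ [PySem.Int.mod x m]),
      pvALoop_acc m (PySem.Int.floordiv x m) ([] ++ [PySem.Int.mod x m])]
    simp
  · conv_lhs => rw [pvALoop, dif_neg h]
    conv_rhs => rw [pvALoop, dif_neg h]
    simp
termination_by x.toNat
decreasing_by
  all_goals
    have h2 : PySem.Int.floordiv x m = x / m := PySem.Int.floordiv_eq_ediv_of_pos (by omega)
    have h3 : x / m < x := Int.ediv_lt_of_lt_mul (by omega) (by nlinarith [h.1, h.2])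
    have h4 : 0 ≤ x / m := Int.ediv_nonneg (le_of_lt h.1) (by omega)
    omega

-- every collected power is positive
theorem pvPowers_mem_pos (x m p q : Int) (hq : q ∈ pvPowers x m p) : 1 ≤ q := by
  by_cases h : p ≤ x ∧ 2 ≤ m ∧ 1 ≤ p
  · rw [pvPowers, dif_pos h] at hq
    rcases List.mem_cons.mp hq with rfl | hq'
    · exact h.2.2
    · exact pvPowers_mem_pos x m (p * m) q hq'
  · rw [pvPowers, dif_neg h] at hq; cases hq
termination_by (x + 1 - p).toNat
decreasing_by
  have h2 : p + 1 ≤ p * m := by nlinarith [h.2.1, h.2.2]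
  omega

-- shifting the starting power by one factor of m = collecting powers for x // m
theorem pvPowers_shift (x m p : Int) (hm : 2 ≤ m) :
    pvPowers x m (p * m) = (pvPowers (x / m) m p).map (· * m) := by
  by_cases h : p ≤ x / m ∧ 2 ≤ m ∧ 1 ≤ p
  · have hle : p * m ≤ x := (Int.le_ediv_iff_mul_le (by omega)).mp h.1
    have h1 : 1 ≤ p * m := by nlinarith [h.2.2]
    conv_lhs => rw [pvPowers, dif_pos ⟨hle, hm, h1⟩]
    conv_rhs => rw [pvPowers, dif_pos h]
    rw [List.map_cons, pvPowers_shift x m (p * m) hm]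
  · have hne : ¬ (p * m ≤ x ∧ 2 ≤ m ∧ 1 ≤ p * m) := by
      intro ⟨ha, _, hc⟩
      have hp1 : 1 ≤ p := by nlinarith
      exact h ⟨(Int.le_ediv_iff_mul_le (by omega)).mpr ha, hm, hp1⟩
    conv_lhs => rw [pvPowers, dif_neg hne]
    conv_rhs => rw [pvPowers, dif_neg h]
    rw [List.map_nil]
termination_by (x + 1 - p * m).toNat
decreasing_by
  have hle : p * m ≤ x := (Int.le_ediv_iff_mul_le (by omega)).mp h.1
  have h2 : p * m + 1 ≤ p * m * m := by nlinarith [h.2.1, h.2.2]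
  omega

-- main lemma: A's least-significant-first digit list = the per-power digits in power order
theorem pvMain (x m : Int) (hm : 2 ≤ m) :
    pvALoop m x [] =
      (pvPowers x m 1).map (fun q => PySem.Int.mod (PySem.Int.floordiv x q) m) := by
  by_cases hx : 0 < x
  · have hfd : PySem.Int.floordiv x m = x / m := PySem.Int.floordiv_eq_ediv_of_pos (by omega)
    conv_lhs => rw [pvALoop, dif_pos ⟨hx, hm⟩]
    rw [pvALoop_acc, pvMain (PySem.Int.floordiv x m) m hm]
    conv_rhs => rw [pvPowers, dif_pos (⟨by omega, hm, by omega⟩ : (1:Int) ≤ x ∧ 2 ≤ m ∧ (1:Int) ≤ 1)]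
    have hshift : pvPowers x m (1 * m) = (pvPowers (x / m) m 1).map (· * m) :=
      pvPowers_shift x m 1 hm
    have h1 : PySem.Int.floordiv x 1 = x := by
      rw [PySem.Int.floordiv_eq_ediv_of_pos (by omega), Int.ediv_one]
    rw [one_mul] at hshift
    rw [List.map_cons, one_mul, hshift, List.map_map, h1, hfd]
    simp only [List.nil_append, List.singleton_append]
    congr 1
    refine List.map_congr_left (fun q hq => ?_)
    have hq1 : 1 ≤ q := pvPowers_mem_pos _ _ _ _ hq
    have e1 : PySem.Int.floordiv x (q * m) = x / (q * m) :=
      PySem.Int.floordiv_eq_ediv_of_pos (by nlinarith)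
    have e2 : PySem.Int.floordiv (x / m) q = (x / m) / q :=
      PySem.Int.floordiv_eq_ediv_of_pos (by omega)
    simp only [Function.comp, e1, e2]
    rw [mul_comm q m, ← Int.ediv_ediv_of_nonneg (show (0:Int) ≤ m by omega)]
  · conv_lhs => rw [pvALoop, dif_neg (show ¬(0 < x ∧ 2 ≤ m) by omega)]
    conv_rhs => rw [pvPowers, dif_neg (show ¬((1:Int) ≤ x ∧ 2 ≤ m ∧ (1:Int) ≤ 1) by omega)]
    rw [List.map_nil]
termination_by x.toNat
decreasing_by
  have hfd : PySem.Int.floordiv x m = x / m := PySem.Int.floordiv_eq_ediv_of_pos (by omega)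
  have h3 : x / m < x := Int.ediv_lt_of_lt_mul (by omega) (by nlinarith)
  have h4 : 0 ≤ x / m := Int.ediv_nonneg (le_of_lt hx) (by omega)
  omega

-- ===== VERDICT (by name: the statement is the Claim_ definition above) =====
theorem base_m_representation_spec : Claim_equal_base_m_representation := by
  intro x m _ hm
  unfold Spec_base_m_representation base_m_representation base_m_representation_alt
  by_cases hx : x == 0
  · simp [hx]
  · simp only [hx, pvMain x m hm, List.map_reverse]
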